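-- pv_equiv track=rewrite | github.com/mel-hsw/agent-failure-attribution | scripts/phase_b_batch.py | predict_cluster
-- ===== SOURCE A (Python) =====
-- CLUSTER_PRIORITY = ["N5", "N4", "N3", "N2", "N1", "P4", "P3", "P2", "P1"]
--
-- def predict_cluster(verdicts: dict[str, str]) -> tuple[str | None, bool]:
--     """Return (predicted_cluster, unassignable).
--
--     Positive-correctness polarity: `no` verdict = failure exhibited.
--     Predicted cluster = rubric with a `no` verdict (argmin). Ties broken by
--     CLUSTER_PRIORITY. Unassignable if all verdicts are `yes`.
--     """
--     no_ids = [rid for rid, v in verdicts.items() if v == "no"]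
--     if not no_ids:
--         return None, True
--     for cid in CLUSTER_PRIORITY:
--         if cid in no_ids:
--             return cid, False
--     return no_ids[0], False
-- ===== SOURCE B (Python) =====
-- CLUSTER_PRIORITY = ["N5", "N4", "N3", "N2", "N1", "P4", "P3", "P2", "P1"]
--
-- def predict_cluster(verdicts: dict[str, str]) -> tuple[str | None, bool]:
--     """Single pass over verdicts: keep the 'no'-rubric with the strictly
--     smallest priority rank (non-priority ids get sentinel rank = len(priority),
--     so the first-encountered one wins ties, matching no_ids[0])."""
--     best = None
--     for rid, v in verdicts.items():
--         if v == "no":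
--             r = CLUSTER_PRIORITY.index(rid) if rid in CLUSTER_PRIORITY else len(CLUSTER_PRIORITY)
--             if best is None or r < best[0]:
--                 best = (r, rid)
--     if best is None:
--         return None, True
--     return best[1], False
-- ===== Notes on version B (the rewrite author's own statement) =====
-- stated objective: alternative
-- what changed: Replaced A's two-phase filter-the-'no'-ids-then-scan-the-priority-list with a single strict-< argmin pass over the verdict items, ranking each 'no' id by its priority index (sentinel = len(CLUSTER_PRIORITY) for off-list ids so the first-encountered wins ties).
import Mathlib
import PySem

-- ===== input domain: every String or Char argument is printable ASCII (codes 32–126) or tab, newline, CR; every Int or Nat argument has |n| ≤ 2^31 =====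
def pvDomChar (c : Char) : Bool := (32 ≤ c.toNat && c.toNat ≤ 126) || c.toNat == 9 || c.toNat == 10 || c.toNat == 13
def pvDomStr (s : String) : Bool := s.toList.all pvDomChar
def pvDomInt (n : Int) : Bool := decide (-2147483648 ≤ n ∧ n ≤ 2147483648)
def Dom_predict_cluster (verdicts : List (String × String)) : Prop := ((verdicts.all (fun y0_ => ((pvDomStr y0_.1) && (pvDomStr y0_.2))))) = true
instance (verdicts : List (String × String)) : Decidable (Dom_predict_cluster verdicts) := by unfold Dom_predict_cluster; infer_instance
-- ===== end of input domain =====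

-- One line: B replaces A's filter-then-priority-scan by a single strict-< argmin pass
-- over the verdict items with a sentinel rank; same return value, alternative decomposition.

-- ===== PORT A =====
def CLUSTER_PRIORITY : List String := ["N5", "N4", "N3", "N2", "N1", "P4", "P3", "P2", "P1"]

def predict_cluster (verdicts : List (String × String)) : Option String × Bool :=
  let no_ids := (verdicts.filter (fun p => p.2 == "no")).map (fun p => p.1)
  if no_ids.isEmpty then (none, true)
  else
    match CLUSTER_PRIORITY.find? (fun cid => no_ids.contains cid) with
    | some cid => (some cid, false)
    | none => (PySem.List.pyGet? no_ids 0, false)  -- no_ids[0]; in range: no_ids ≠ [] on this branch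

-- ===== PORT B =====
-- rank of Source B: `CLUSTER_PRIORITY.index(rid) if rid in CLUSTER_PRIORITY else len(CLUSTER_PRIORITY)`;
-- index? is none exactly when rid is not in the list, matching the membership guard.
def pvRank (rid : String) : Int :=
  match PySem.List.index? CLUSTER_PRIORITY rid with
  | some i => (i : Int)
  | none => (CLUSTER_PRIORITY.length : Int)

def predict_cluster_alt (verdicts : List (String × String)) : Option String × Bool :=
  let best := verdicts.foldl (fun best p =>
    if p.2 == "no" then
      let r := pvRank p.1
      match best with
      | none => some (r, p.1)
      | some (br, b) => if r < br then some (r, p.1) else some (br, b)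
    else best) none
  match best with
  | none => (none, true)
  | some (_, b) => (some b, false)

-- ===== PRECONDITION & SPEC =====
def Spec_predict_cluster (verdicts : List (String × String)) (out : Option String × Bool) : Prop := out = predict_cluster_alt verdicts
instance (verdicts : List (String × String)) (out : Option String × Bool) : Decidable (Spec_predict_cluster verdicts out) := by unfold Spec_predict_cluster; infer_instance

-- ===== CLAIM (what is proved, stated in full; the proofs are below) =====
def Claim_equal_predict_cluster : Prop := ∀ (verdicts : List (String × String)), Dom_predict_cluster verdicts → Spec_predict_cluster verdicts (predict_cluster verdicts)

-- ===== LEMMAS AND PROOFS =====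

-- rank of a string in an arbitrary priority list (proof-side generalisation of pvRank)
def pvRk (L : List String) (x : String) : Int :=
  match PySem.List.index? L x with
  | some i => (i : Int)
  | none => (L.length : Int)

lemma pvRank_eq_rk (x : String) : pvRank x = pvRk CLUSTER_PRIORITY x := rfl

lemma pvRk_nonneg (L : List String) (x : String) : 0 ≤ pvRk L x := by
  unfold pvRk; cases PySem.List.index? L x <;> simp

lemma pvRk_le_len (L : List String) (x : String) : pvRk L x ≤ (L.length : Int) := by
  unfold pvRk
  cases h : PySem.List.index? L x with
  | none => simp
  | some k =>
      rcases (PySem.List.index?_eq_some_iff L x k).mp h with ⟨pre, suf, hL, hk, -⟩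
      subst hL; subst hk; simp; omega

lemma pvRk_cons (a : String) (L : List String) (x : String) :
    pvRk (a :: L) x = if a = x then 0 else pvRk L x + 1 := by
  unfold pvRk
  by_cases hax : a = x
  · subst hax; rw [PySem.List.index?_cons_self]; simp
  · rw [PySem.List.index?_cons_of_ne L hax]
    cases PySem.List.index? L x <;> simp [hax]

-- A's priority scan returns exactly the minimum-rank element (or none when off-list)
lemma find_min (L : List String) (ns : List String) (c : String)
    (hc : c ∈ ns) (hmin : ∀ x ∈ ns, pvRk L c ≤ pvRk L x) :
    L.find? (fun cid => decide (cid ∈ ns)) =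
      (if pvRk L c < (L.length : Int) then some c else none) := by
  induction L generalizing c with
  | nil =>
      have := pvRk_nonneg [] c
      simp [pvRk] at *
  | cons a L ih =>
      by_cases ha : a ∈ ns
      · have h0 : pvRk (a :: L) c ≤ pvRk (a :: L) a := hmin a ha
        have hra : pvRk (a :: L) a = 0 := by rw [pvRk_cons]; simp
        have hrc0 : pvRk (a :: L) c = 0 := by
          have := pvRk_nonneg (a :: L) c; omega
        have hca : c = a := by
          rw [pvRk_cons] at hrc0
          by_cases hac : a = c
          · exact hac.symm
          · have := pvRk_nonneg L c; simp [hac] at hrc0; omega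
        have hlt : pvRk (a :: L) c < ((a :: L).length : Int) := by
          rw [hrc0]; simp
        rw [List.find?_cons_of_pos (by simpa using ha), if_pos hlt, hca]
      · have hac : ∀ x ∈ ns, a ≠ x := by
          intro x hx hax; exact ha (hax ▸ hx)
        have hmin' : ∀ x ∈ ns, pvRk L c ≤ pvRk L x := by
          intro x hx
          have := hmin x hx
          rw [pvRk_cons, pvRk_cons] at this
          simp [hac c hc, hac x hx] at this; omega
        have hiff : (pvRk (a :: L) c < ((a :: L).length : Int)) ↔
            (pvRk L c < (L.length : Int)) := by
          rw [pvRk_cons]; simp [hac c hc]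
        rw [List.find?_cons_of_neg (by simpa using ha), ih c hc hmin',
            if_congr hiff.symm rfl rfl]
-- the inner step of B's fold, once the 'no'-filter is factored out
def pvStep (best : Option (Int × String)) (rid : String) : Option (Int × String) :=
  match best with
  | none => some (pvRank rid, rid)
  | some (br, b) => if pvRank rid < br then some (pvRank rid, rid) else some (br, b)

-- B's fold over verdicts equals the same fold over the list of 'no'-ids
lemma fold_filter (vs : List (String × String)) (acc : Option (Int × String)) :
    vs.foldl (fun best p =>
      if p.2 == "no" then
        let r := pvRank p.1
        match best with
        | none => some (r, p.1)
        | some (br, b) => if r < br then some (r, p.1) else some (br, b)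
      else best) acc
    = ((vs.filter (fun p => p.2 == "no")).map (fun p => p.1)).foldl pvStep acc := by
  induction vs generalizing acc with
  | nil => rfl
  | cons p vs ih =>
      by_cases h : (p.2 == "no") = true
      · rw [List.filter_cons, if_pos h, List.map_cons, List.foldl_cons, List.foldl_cons, ← ih]
        congr 1
        show (if (p.2 == "no") = true then
            let r := pvRank p.1
            match acc with
            | none => some (r, p.1)
            | some (br, b) => if r < br then some (r, p.1) else some (br, b)
          else acc) = pvStep acc p.1
        rw [if_pos h]; rfl
      · rw [List.filter_cons, if_neg h, List.foldl_cons, ← ih]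
        congr 1
        show (if (p.2 == "no") = true then
            let r := pvRank p.1
            match acc with
            | none => some (r, p.1)
            | some (br, b) => if r < br then some (r, p.1) else some (br, b)
          else acc) = acc
        rw [if_neg h]

-- invariant of B's strict-< argmin fold: it returns the first element attaining the
-- minimum rank (strict < keeps the earlier element on ties)
lemma fold_spec (ns : List String) (b : String) :
    ∃ c, ns.foldl pvStep (some (pvRank b, b)) = some (pvRank c, c) ∧
      c ∈ b :: ns ∧ (∀ x ∈ b :: ns, pvRank c ≤ pvRank x) ∧
      ((∀ x ∈ ns, pvRank b ≤ pvRank x) → c = b) := by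
  induction ns generalizing b with
  | nil =>
      refine ⟨b, rfl, by simp, ?_, fun _ => rfl⟩
      intro x hx; rw [List.mem_singleton] at hx; rw [hx]
  | cons x xs ih =>
      by_cases hlt : pvRank x < pvRank b
      · obtain ⟨c, hfold, hmem, hmin, htie⟩ := ih x
        refine ⟨c, ?_, ?_, ?_, ?_⟩
        · rw [List.foldl_cons]; rw [show pvStep (some (pvRank b, b)) x = some (pvRank x, x) by
            simp [pvStep, hlt]]
          exact hfold
        · exact List.mem_cons.mpr (Or.inr hmem)
        · intro y hy
          rcases List.mem_cons.mp hy with h | h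
          · subst h
            have := hmin x (List.mem_cons.mpr (Or.inl rfl)); omega
          · exact hmin y h
        · intro htie'
          exact absurd (htie' x (List.mem_cons.mpr (Or.inl rfl))) (by omega)
      · obtain ⟨c, hfold, hmem, hmin, htie⟩ := ih b
        refine ⟨c, ?_, ?_, ?_, ?_⟩
        · rw [List.foldl_cons]; rw [show pvStep (some (pvRank b, b)) x = some (pvRank b, b) by
            simp [pvStep, hlt]]
          exact hfold
        · rcases List.mem_cons.mp hmem with h | h
          · exact List.mem_cons.mpr (Or.inl h)
          · exact List.mem_cons.mpr (Or.inr (List.mem_cons.mpr (Or.inr h)))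
        · intro y hy
          rcases List.mem_cons.mp hy with h | hy'
          · exact hmin y (List.mem_cons.mpr (Or.inl h))
          · rcases List.mem_cons.mp hy' with h | h
            · subst h
              have := hmin b (List.mem_cons.mpr (Or.inl rfl)); omega
            · exact hmin y (List.mem_cons.mpr (Or.inr h))
        · intro htie'
          exact htie (fun y hy => htie' y (List.mem_cons.mpr (Or.inr hy)))

-- ===== VERDICT (by name: the statement is the Claim_ definition above) =====
theorem predict_cluster_spec : Claim_equal_predict_cluster := by
  intro verdicts _
  show predict_cluster verdicts = predict_cluster_alt verdicts
  have hB : predict_cluster_alt verdicts =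
      (match ((verdicts.filter (fun p => p.2 == "no")).map (fun p => p.1)).foldl pvStep none with
       | none => (none, true)
       | some (_, b) => (some b, false)) :=
    congrArg (fun o => match o with | none => (none, true) | some (_, b) => (some b, false))
      (fold_filter verdicts none)
  have hA : predict_cluster verdicts =
      (if ((verdicts.filter (fun p => p.2 == "no")).map (fun p => p.1)).isEmpty then
        ((none : Option String), true)
       else
        match CLUSTER_PRIORITY.find? (fun cid =>
            ((verdicts.filter (fun p => p.2 == "no")).map (fun p => p.1)).contains cid) with
        | some cid => (some cid, false)
        | none => (PySem.List.pyGet?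
            ((verdicts.filter (fun p => p.2 == "no")).map (fun p => p.1)) 0, false)) := rfl
  rw [hA, hB]
  generalize (verdicts.filter (fun p => p.2 == "no")).map (fun p => p.1) = ns
  cases ns with
  | nil => rfl
  | cons x0 xs =>
      obtain ⟨c, hfold, hmem, hmin, htie⟩ := fold_spec xs x0
      rw [List.foldl_cons, show pvStep none x0 = some (pvRank x0, x0) from rfl, hfold]
      have hfind := find_min CLUSTER_PRIORITY (x0 :: xs) c hmem hmin
      rw [show (fun cid => (x0 :: xs).contains cid) = (fun cid => decide (cid ∈ x0 :: xs)) from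
        funext (fun cid => List.contains_eq_mem cid (x0 :: xs)), hfind]
      simp only [← pvRank_eq_rk, List.isEmpty_cons, Bool.false_eq_true, if_false]
      by_cases hlt : pvRank c < ((CLUSTER_PRIORITY.length : Nat) : Int)
      · rw [if_pos hlt]
      · rw [if_neg hlt]
        have hc0 : c = x0 := by
          apply htie
          intro y hy
          have h9 : pvRank c = ((CLUSTER_PRIORITY.length : Nat) : Int) :=
            le_antisymm (pvRk_le_len CLUSTER_PRIORITY c) (not_lt.mp hlt)
          have hy' := hmin y (List.mem_cons.mpr (Or.inr hy))
          have hyl : pvRank y ≤ ((CLUSTER_PRIORITY.length : Nat) : Int) :=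
            pvRk_le_len CLUSTER_PRIORITY y
          have hx0l : pvRank x0 ≤ ((CLUSTER_PRIORITY.length : Nat) : Int) :=
            pvRk_le_len CLUSTER_PRIORITY x0
          omega
        rw [hc0, PySem.List.pyGet?_zero_cons]
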